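-- pv_equiv track=rewrite | github.com/shlomif/shlomif-snippets | generate_products.py | gen_products
-- ===== SOURCE A (Python) =====
-- def gen_products(lst, idx, prod):
--     if idx == len(lst):
--         yield prod
--         return
--     for x in gen_products(lst, idx+1, prod):
--         yield x
--     for x in gen_products(lst, idx+1, prod*lst[idx]):
--         yield x
-- ===== SOURCE B (Python) =====
-- def gen_products(lst, idx, prod):
--     n = len(lst) - idx
--     for mask in range(1 << n):
--         p = prod
--         for j in range(n):
--             if (mask >> (n - 1 - j)) & 1:
--                 p = p * lst[idx + j]
--         yield p
-- ===== Notes on version B (the rewrite author's own statement) =====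
-- stated objective: alternative
-- what changed: Replaces A's exclude/include recursion with flat bitmask enumeration: each of the 2^(len-idx) products is rebuilt from scratch from the bits of a counter (first element = most significant bit), preserving A's exact yield order.
import Mathlib
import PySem

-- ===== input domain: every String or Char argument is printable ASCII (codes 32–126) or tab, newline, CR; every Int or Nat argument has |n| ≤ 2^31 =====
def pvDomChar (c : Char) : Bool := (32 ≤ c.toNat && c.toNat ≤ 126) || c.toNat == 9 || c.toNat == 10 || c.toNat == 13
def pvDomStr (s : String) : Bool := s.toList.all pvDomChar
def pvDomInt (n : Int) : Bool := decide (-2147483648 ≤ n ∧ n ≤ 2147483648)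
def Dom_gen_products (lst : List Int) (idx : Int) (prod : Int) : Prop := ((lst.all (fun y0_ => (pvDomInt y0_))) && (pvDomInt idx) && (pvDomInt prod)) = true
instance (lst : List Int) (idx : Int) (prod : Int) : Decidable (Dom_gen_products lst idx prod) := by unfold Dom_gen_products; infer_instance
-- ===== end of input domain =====

-- B replaces A's exclude/include recursion with a flat bitmask enumeration that rebuilds each
-- product from the bits of a counter (first element = most significant bit); same yield order,
-- objective: alternative algorithm of similar cost.

-- ===== PORT A =====
-- literal port of A's recursion; when idx > len(lst) Python A never terminates (RecursionError),
-- the port returns [] there — excluded by Pre_.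
def gen_products (lst : List Int) (idx : Int) (prod : Int) : List Int :=
  if idx = (lst.length : Int) then [prod]
  else if (lst.length : Int) < idx then []
  else gen_products lst (idx + 1) prod ++
       gen_products lst (idx + 1) (prod * ((PySem.List.pyGet? lst idx).getD 0))
termination_by ((lst.length : Int) - idx).toNat
decreasing_by all_goals omega

-- ===== PORT B =====
-- inner loop of Source B: p = prod; for j in range(n): if (mask >> (n-1-j)) & 1: p = p * lst[idx+j]
def altProd (lst : List Int) (idx : Int) (n : Nat) (prod : Int) (mask : Nat) : Int :=
  (List.range n).foldl
    (fun p j => if (mask >>> (n - 1 - j)) &&& 1 = 1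
                then p * ((PySem.List.pyGet? lst (idx + (j : Int))).getD 0) else p)
    prod

def gen_products_alt (lst : List Int) (idx : Int) (prod : Int) : List Int :=
  (List.range (2 ^ ((lst.length : Int) - idx).toNat)).map
    (altProd lst idx (((lst.length : Int) - idx).toNat) prod)

-- ===== PRECONDITION & SPEC =====
-- Pre_ is exactly where Python A returns: idx > len gives RecursionError, idx < -len gives IndexError.
def Pre_gen_products (lst : List Int) (idx : Int) (prod : Int) : Prop :=
  -(lst.length : Int) ≤ idx ∧ idx ≤ (lst.length : Int)
instance (lst : List Int) (idx : Int) (prod : Int) : Decidable (Pre_gen_products lst idx prod) := by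
  unfold Pre_gen_products; infer_instance

def pvWitness_gen_products : List Int × Int × Int := ([2, 3], 0, 1)

def Spec_gen_products (lst : List Int) (idx : Int) (prod : Int) (out : List Int) : Prop :=
  out = gen_products_alt lst idx prod
instance (lst : List Int) (idx : Int) (prod : Int) (out : List Int) : Decidable (Spec_gen_products lst idx prod out) := by unfold Spec_gen_products; infer_instance

-- ===== CLAIM (what is proved, stated in full; the proofs are below) =====
def Claim_equal_gen_products : Prop := ∀ (lst : List Int) (idx : Int) (prod : Int), Dom_gen_products lst idx prod → Pre_gen_products lst idx prod → Spec_gen_products lst idx prod (gen_products lst idx prod)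

-- ===== LEMMAS AND PROOFS =====

-- bit k of mask + 2^m equals bit k of mask, for k < m
theorem pv_bit_add_pow (mask m k : Nat) (hk : k < m) :
    ((mask + 2 ^ m) >>> k) &&& 1 = (mask >>> k) &&& 1 := by
  rw [Nat.shiftRight_eq_div_pow, Nat.shiftRight_eq_div_pow, Nat.and_one_is_mod,
    Nat.and_one_is_mod]
  have h2 : 2 ^ m = 2 ^ (m - k - 1) * 2 * 2 ^ k := by
    rw [mul_assoc, ← pow_succ']
    rw [← pow_add]
    congr 1
    omega
  rw [h2, Nat.add_mul_div_right _ _ (Nat.two_pow_pos k)]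
  omega

-- excluding element idx (top bit clear): one step of B's enumeration
theorem pv_altProd_lo (lst : List Int) (idx prod : Int) (m mask : Nat) (hm : mask < 2 ^ m) :
    altProd lst idx (m + 1) prod mask = altProd lst (idx + 1) m prod mask := by
  unfold altProd
  rw [List.range_succ_eq_map, List.foldl_cons, List.foldl_map]
  have htop : (mask >>> (m + 1 - 1 - 0)) &&& 1 = 0 := by
    simp [Nat.shiftRight_eq_div_pow, Nat.and_one_is_mod, Nat.div_eq_of_lt hm]
  rw [htop]
  simp only [show (0 : Nat) ≠ 1 by decide]
  apply PySem.List.foldl_congr_mem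
  intro p j _
  have h1 : m - (j + 1) = m - 1 - j := by omega
  have h2 : idx + ((j : Int) + 1) = idx + 1 + (j : Int) := by ring
  simp [h1, h2]

-- including element idx (top bit set): one step of B's enumeration
theorem pv_altProd_hi (lst : List Int) (idx prod : Int) (m mask : Nat) (hm : mask < 2 ^ m) :
    altProd lst idx (m + 1) prod (mask + 2 ^ m) =
      altProd lst (idx + 1) m (prod * ((PySem.List.pyGet? lst idx).getD 0)) mask := by
  unfold altProd
  rw [List.range_succ_eq_map, List.foldl_cons, List.foldl_map]
  have htop : ((mask + 2 ^ m) >>> (m + 1 - 1 - 0)) &&& 1 = 1 := by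
    rw [Nat.shiftRight_eq_div_pow, Nat.and_one_is_mod]
    simp only [Nat.add_sub_cancel, Nat.sub_zero]
    rw [Nat.add_div_right _ (Nat.two_pow_pos m), Nat.div_eq_of_lt hm]
  rw [htop]
  have hidx : idx + ((0 : Nat) : Int) = idx := by simp
  rw [hidx]
  apply PySem.List.foldl_congr_mem
  intro p j hj
  have hjm : j < m := List.mem_range.mp hj
  have h1 : m - (j + 1) = m - 1 - j := by omega
  have hbit : ((mask + 2 ^ m) >>> (m - 1 - j)) &&& 1 = (mask >>> (m - 1 - j)) &&& 1 :=
    pv_bit_add_pow mask m (m - 1 - j) (by omega)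
  rw [Nat.and_one_is_mod, Nat.and_one_is_mod] at hbit
  have h2 : idx + ((j : Int) + 1) = idx + 1 + (j : Int) := by ring
  simp [h1, h2, hbit]

-- B's enumeration satisfies A's recursion
theorem pv_alt_step (lst : List Int) (idx prod : Int) (k : Nat)
    (hk : ((lst.length : Int) - idx).toNat = k + 1) :
    gen_products_alt lst idx prod =
      gen_products_alt lst (idx + 1) prod ++
      gen_products_alt lst (idx + 1) (prod * ((PySem.List.pyGet? lst idx).getD 0)) := by
  have hk' : ((lst.length : Int) - (idx + 1)).toNat = k := by omega
  unfold gen_products_alt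
  rw [hk, hk']
  have hsplit : 2 ^ (k + 1) = 2 ^ k + 2 ^ k := by ring
  rw [hsplit, List.range_add, List.map_append, List.map_map]
  congr 1
  · exact List.map_congr_left fun mask hmask =>
      pv_altProd_lo lst idx prod k mask (List.mem_range.mp hmask)
  · exact List.map_congr_left fun mask hmask => by
      have hm := List.mem_range.mp hmask
      simp only [Function.comp_apply]
      rw [Nat.add_comm (2 ^ k) mask, pv_altProd_hi lst idx prod k mask hm]

theorem pv_main (k : Nat) : ∀ (lst : List Int) (idx prod : Int),
    -(lst.length : Int) ≤ idx → idx ≤ (lst.length : Int) →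
    ((lst.length : Int) - idx).toNat = k →
    gen_products lst idx prod = gen_products_alt lst idx prod := by
  induction k with
  | zero =>
    intro lst idx prod _ hle hk
    have hidx : idx = (lst.length : Int) := by omega
    rw [gen_products, if_pos hidx]
    unfold gen_products_alt
    rw [show ((lst.length : Int) - idx).toNat = 0 from hk]
    simp [altProd]
  | succ k ih =>
    intro lst idx prod hge hle hk
    have hne : idx ≠ (lst.length : Int) := by omega
    have hnlt : ¬ (lst.length : Int) < idx := by omega
    rw [gen_products, if_neg hne, if_neg hnlt]
    rw [ih lst (idx + 1) prod (by omega) (by omega) (by omega),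
        ih lst (idx + 1) (prod * ((PySem.List.pyGet? lst idx).getD 0)) (by omega) (by omega) (by omega)]
    exact (pv_alt_step lst idx prod k hk).symm

-- ===== VERDICT (by name: the statement is the Claim_ definition above) =====
theorem gen_products_spec : Claim_equal_gen_products := by
  intro lst idx prod _ hpre
  unfold Spec_gen_products
  exact pv_main ((lst.length : Int) - idx).toNat lst idx prod hpre.1 hpre.2 rfl
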